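-- pv_equiv track=rewrite | github.com/liamkeane/CS.322 | Text Classification/classify.py | classify_doc_with_word_lookup
-- ===== SOURCE A (Python) =====
-- def classify_doc_with_word_lookup(doc_in,
--                                   valid_words=[('good', 1),
--                                                ('bad', -1),
--                                                ('excellent', 1),
--                                                ('dissapointing', -1)]):
--     '''This function loops over all word, score pairs in the valid_words
--     input, while keeping a running score sum (the score starts at
--     zero).  If a word w appears in the document, the score is
--     incremented/decremented by the associated word score, i.e., if
--     'good' is in the document score = score + 1.
--
--     You are welcome to play around with the valid_words argument to
--     try to make a better hand-designed classifier, if you want!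
--     '''
--     sum_of_valences = 0
--
--     # loop through all words in doc_in
--     for word in doc_in:
--         # loop through all valid words and their valences
--         for (val_word, valence) in valid_words:
--             # if the word from doc_in is in valid_words, add its valence to the sum
--             if word == val_word:
--                 sum_of_valences += valence
--                 break
--
--     if sum_of_valences > 0:
--         return 1
--     else:
--         return 0
-- ===== SOURCE B (Python) =====
-- def classify_doc_with_word_lookup(doc_in,
--                                   valid_words=[('good', 1),
--                                                ('bad', -1),
--                                                ('excellent', 1),
--                                                ('dissapointing', -1)]):
--     # Transposed traversal: iterate the lexicon ONCE (skipping repeated words,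
--     # which mirrors A's break taking the first match); each entry contributes
--     # valence * (number of occurrences of its word in the document).
--     total = 0
--     seen = set()
--     for w, v in valid_words:
--         if w not in seen:
--             seen.add(w)
--             total += v * doc_in.count(w)
--     return 1 if total > 0 else 0
-- ===== Notes on version B (the rewrite author's own statement) =====
-- stated objective: alternative
-- what changed: Transposes the loop nest: instead of scanning valid_words for each document token with a break, B iterates the lexicon once (skipping repeated lexicon words, which encodes the break) and adds valence * doc_in.count(word) per entry, so the document is traversed per lexicon entry rather than the lexicon per token.
import Mathlib
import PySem

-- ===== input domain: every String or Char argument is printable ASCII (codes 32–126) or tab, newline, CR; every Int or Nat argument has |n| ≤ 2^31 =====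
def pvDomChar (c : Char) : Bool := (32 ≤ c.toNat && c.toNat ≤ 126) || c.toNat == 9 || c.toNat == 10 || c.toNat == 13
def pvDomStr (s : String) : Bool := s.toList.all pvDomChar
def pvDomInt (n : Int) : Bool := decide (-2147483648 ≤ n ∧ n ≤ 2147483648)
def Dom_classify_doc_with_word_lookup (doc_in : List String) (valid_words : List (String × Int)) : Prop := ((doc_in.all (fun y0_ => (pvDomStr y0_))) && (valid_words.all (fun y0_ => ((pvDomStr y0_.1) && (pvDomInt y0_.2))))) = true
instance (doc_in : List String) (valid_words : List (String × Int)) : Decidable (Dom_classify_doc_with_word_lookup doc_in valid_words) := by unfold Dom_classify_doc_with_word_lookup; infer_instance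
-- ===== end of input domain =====

-- B transposes the loop nest: one pass over the lexicon (skipping repeated words = A's break), adding valence * count(word in doc) per entry; objective: alternative.


-- ===== PORT A =====
-- inner 'for (val_word, valence) in valid_words: if word == val_word: sum += valence; break'
def pvInnerA (word : String) (s : Int) : List (String × Int) → Int
  | [] => s
  | (val_word, valence) :: rest =>
      if word == val_word then s + valence else pvInnerA word s rest

def classify_doc_with_word_lookup (doc_in : List String) (valid_words : List (String × Int)) : Int :=
  let sum_of_valences := doc_in.foldl (fun s word => pvInnerA word s valid_words) 0
  if sum_of_valences > 0 then 1 else 0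

-- ===== PORT B =====
-- 'for w, v in valid_words: if w not in seen: seen.add(w); total += v * doc_in.count(w)'
def classify_doc_with_word_lookup_alt (doc_in : List String) (valid_words : List (String × Int)) : Int :=
  let st := valid_words.foldl
    (fun (acc : Int × PySem.Set String) p =>
      if PySem.Set.contains acc.2 p.1 then acc
      else (acc.1 + p.2 * PySem.List.count doc_in p.1, PySem.Set.add acc.2 p.1))
    (0, PySem.Set.empty)
  if st.1 > 0 then 1 else 0

-- ===== PRECONDITION & SPEC =====
def Spec_classify_doc_with_word_lookup (doc_in : List String) (valid_words : List (String × Int)) (out : Int) : Prop := out = classify_doc_with_word_lookup_alt doc_in valid_words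
instance (doc_in : List String) (valid_words : List (String × Int)) (out : Int) : Decidable (Spec_classify_doc_with_word_lookup doc_in valid_words out) := by unfold Spec_classify_doc_with_word_lookup; infer_instance

-- ===== CLAIM (what is proved, stated in full; the proofs are below) =====
def Claim_equal_classify_doc_with_word_lookup : Prop := ∀ (doc_in : List String) (valid_words : List (String × Int)), Dom_classify_doc_with_word_lookup doc_in valid_words → Spec_classify_doc_with_word_lookup doc_in valid_words (classify_doc_with_word_lookup doc_in valid_words)

-- ===== LEMMAS AND PROOFS =====

-- the inner loop adds a value independent of the running sum
theorem pvInnerA_eq_add (word : String) (s : Int) (vw : List (String × Int)) :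
    pvInnerA word s vw = s + pvInnerA word 0 vw := by
  induction vw with
  | nil => simp [pvInnerA]
  | cons p rest ih =>
    obtain ⟨a, v⟩ := p
    by_cases h : word == a <;> simp [pvInnerA, h, ih]

-- A's accumulated sum is the sum of the per-word contributions
theorem pvSumA (doc : List String) (vw : List (String × Int)) (s : Int) :
    doc.foldl (fun s word => pvInnerA word s vw) s
      = s + (doc.map (fun w => pvInnerA w 0 vw)).sum := by
  induction doc generalizing s with
  | nil => simp
  | cons w rest ih =>
    simp only [List.foldl_cons, List.map_cons, List.sum_cons]
    rw [ih, pvInnerA_eq_add w s]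
    ring

-- selecting one word out of a sum yields valence * count
theorem pvSumIfEq (doc : List String) (a : String) (v : Int) :
    (doc.map (fun w => if w = a then v else 0)).sum = v * (doc.count a : Int) := by
  induction doc with
  | nil => simp
  | cons w rest ih =>
    by_cases h : w = a
    · subst h; simp [ih]; ring
    · simp [h, ih]

-- invariant of B's single pass over the lexicon
theorem pvSumMapAdd {α : Type} (l : List α) (f g : α → Int) :
    (l.map (fun x => f x + g x)).sum = (l.map f).sum + (l.map g).sum := by
  induction l with
  | nil => simp
  | cons x rest ih => simp [ih]; ring

theorem pvFoldB (doc : List String) (vw : List (String × Int)) (s : Int) (S : PySem.Set String) :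
    (vw.foldl
      (fun (acc : Int × PySem.Set String) p =>
        if PySem.Set.contains acc.2 p.1 then acc
        else (acc.1 + p.2 * PySem.List.count doc p.1, PySem.Set.add acc.2 p.1))
      (s, S)).1
      = s + (doc.map (fun w => if w ∈ S then 0 else pvInnerA w 0 vw)).sum := by
  induction vw generalizing s S with
  | nil => simp [pvInnerA]
  | cons p rest ih =>
    obtain ⟨a, v⟩ := p
    simp only [List.foldl_cons]
    by_cases hSa : a ∈ S
    · rw [if_pos (by simpa [PySem.Set.contains] using hSa), ih]
      congr 2
      apply List.map_congr_left
      intro w _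
      by_cases hSw : w ∈ S
      · simp [hSw]
      · have hwa : (w == a) = false := by
          simp only [beq_eq_false_iff_ne]
          rintro rfl; exact hSw hSa
        simp [hSw, pvInnerA, hwa]
    · rw [if_neg (by simpa [PySem.Set.contains] using hSa), ih]
      have hpt : ∀ w ∈ doc,
          (if w ∈ S then 0 else pvInnerA w 0 ((a, v) :: rest))
            = (if w ∈ PySem.Set.add S a then 0 else pvInnerA w 0 rest)
              + (if w = a then v else 0) := by
        intro w _
        by_cases hwa : w = a
        · subst hwa
          simp [hSa, pvInnerA]
        · have h1 : (w ∈ PySem.Set.add S a) ↔ w ∈ S := by simp [PySem.Set.mem_add, hwa]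
          have hba : (w == a) = false := by simpa using hwa
          by_cases hSw : w ∈ S <;> simp [hSw, h1, pvInnerA, hba, hwa]
      rw [congrArg List.sum (List.map_congr_left hpt), pvSumMapAdd, pvSumIfEq,
        PySem.List.count_eq]
      ring

-- ===== VERDICT (by name: the statement is the Claim_ definition above) =====
theorem classify_doc_with_word_lookup_spec : Claim_equal_classify_doc_with_word_lookup := by
  intro doc vw _
  unfold Spec_classify_doc_with_word_lookup
  show (if doc.foldl (fun s word => pvInnerA word s vw) 0 > 0 then (1 : Int) else 0)
      = (if (vw.foldl
          (fun (acc : Int × PySem.Set String) p =>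
            if PySem.Set.contains acc.2 p.1 then acc
            else (acc.1 + p.2 * PySem.List.count doc p.1, PySem.Set.add acc.2 p.1))
          (0, PySem.Set.empty)).1 > 0 then 1 else 0)
  rw [pvFoldB doc vw 0 PySem.Set.empty, pvSumA doc vw 0]
  have h0 : (fun w => if w ∈ (PySem.Set.empty : PySem.Set String) then (0 : Int) else pvInnerA w 0 vw)
      = fun w => pvInnerA w 0 vw := by
    funext w; simp [PySem.Set.empty]
  rw [h0]
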